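-- pv_equiv track=rewrite | github.com/PromasterGuru/Hackerrank-Solutions | Valid Binary String/main.py | minimumMoves1
-- ===== SOURCE A (Python) =====
-- def minimumMoves1(s, d):
--     count = 0
--     i = 0
--     while(i < len(s)):
--         if(s[i] == "0"):
--             if("1" in s[i:]):
--                 pos = s[i:].index("1")
--                 count += len(s[i:i+pos])//d
--                 i += pos
--             else:
--                 count += len(s[i:])//d
--                 i += len(s)
--         else:
--             i+=1
--     return count
-- ===== SOURCE B (Python) =====
-- def minimumMoves1(s, d):
--     total = 0
--     run = -1  # -1: not inside a zero-started segment; >=0: chars since the segment's first '0'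
--     for ch in s:
--         if ch == '1':
--             if run >= 0:
--                 total += run // d
--                 run = -1
--         elif run >= 0:
--             run += 1
--         elif ch == '0':
--             run = 1
--     if run >= 0:
--         total += run // d
--     return total
-- ===== Notes on version B (the rewrite author's own statement) =====
-- stated objective: faster
-- what changed: Replaces the index/slice-based while loop (which re-slices and re-scans the suffix at every '0') by a single left-to-right pass that tracks the length of the current zero-started segment and flushes count//d at each terminating '1' and at the end.
import Mathlib
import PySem

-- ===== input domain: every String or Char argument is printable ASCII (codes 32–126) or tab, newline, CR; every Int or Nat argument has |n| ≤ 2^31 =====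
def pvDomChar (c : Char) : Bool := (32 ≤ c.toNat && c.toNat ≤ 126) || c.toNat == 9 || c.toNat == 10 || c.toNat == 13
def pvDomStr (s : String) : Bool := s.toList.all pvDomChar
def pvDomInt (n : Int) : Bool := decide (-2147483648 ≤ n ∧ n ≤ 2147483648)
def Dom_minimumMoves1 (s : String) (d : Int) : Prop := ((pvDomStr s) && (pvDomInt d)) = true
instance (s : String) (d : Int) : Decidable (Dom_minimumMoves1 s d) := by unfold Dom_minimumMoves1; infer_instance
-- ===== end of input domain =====

-- B replaces A's quadratic slice-and-rescan while loop by one linear pass over the characters.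

-- ===== PORT A =====
-- termination helper for A's loop: when cs[i] = '0' and s[i:] contains a '1',
-- the index of that '1' within the suffix is at least 1, so i strictly increases
theorem minimumMoves1_pos_ge_one (cs : List Char) (i : Nat) (h : i < cs.length)
    (h0 : cs[i] = '0') (pos : Nat)
    (hidx : PySem.List.index? (cs.drop i) '1' = some pos) : 1 ≤ pos := by
  rw [PySem.List.index?_eq_some_iff] at hidx
  obtain ⟨pre, suf, hsplit, hlen, hnp⟩ := hidx
  rcases pre with _ | ⟨c0, pre'⟩
  · exfalso
    have hhd : (cs.drop i).head? = some '1' := by rw [hsplit]; simp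
    rw [List.drop_eq_getElem_cons h] at hhd
    simp [h0] at hhd
  · simp [List.length_cons] at hlen; omega

-- A's while loop: i is the index, count the accumulator
def minimumMoves1Go (cs : List Char) (d : Int) (i : Nat) (count : Int) : Int :=
  if h : i < cs.length then
    if h0 : cs[i] = '0' then
      match hidx : PySem.List.index? (PySem.List.slice cs (some (i : Int)) none) '1' with
      | some pos =>
          minimumMoves1Go cs d (i + pos)
            (count + PySem.Int.floordiv
              ((PySem.List.slice cs (some (i : Int)) (some ((i : Int) + (pos : Int)))).length : Int) d)
      | none =>
          count + PySem.Int.floordiv ((PySem.List.slice cs (some (i : Int)) none).length : Int) d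
    else
      minimumMoves1Go cs d (i + 1) count
  else
    count
termination_by cs.length - i
decreasing_by
  · rw [PySem.List.slice_from_natCast] at hidx
    have := minimumMoves1_pos_ge_one cs i h h0 pos hidx
    omega
  · omega

def minimumMoves1 (s : String) (d : Int) : Int :=
  minimumMoves1Go s.toList d 0 0

-- ===== PORT B =====
-- one step of B's single pass: state = (total, run); run = -1 means "not in a zero-started segment"
def minimumMoves1AltStep (d : Int) (acc : Int × Int) (ch : Char) : Int × Int :=
  if ch = '1' then
    if 0 ≤ acc.2 then (acc.1 + PySem.Int.floordiv acc.2 d, -1) else acc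
  else if 0 ≤ acc.2 then (acc.1, acc.2 + 1)
  else if ch = '0' then (acc.1, 1)
  else acc

def minimumMoves1_alt (s : String) (d : Int) : Int :=
  let r := s.toList.foldl (minimumMoves1AltStep d) (0, -1)
  if 0 ≤ r.2 then r.1 + PySem.Int.floordiv r.2 d else r.1

-- ===== PRECONDITION & SPEC =====
-- Pre_ excludes exactly the inputs where the Python A raises ZeroDivisionError:
-- d = 0 while s contains a '0' (the Python B raises there too).
def Pre_minimumMoves1 (s : String) (d : Int) : Prop := ¬ (d = 0 ∧ '0' ∈ s.toList)
instance (s : String) (d : Int) : Decidable (Pre_minimumMoves1 s d) := by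
  unfold Pre_minimumMoves1; infer_instance

def pvWitness_minimumMoves1 : String × Int := ("0100", 2)

def Spec_minimumMoves1 (s : String) (d : Int) (out : Int) : Prop := out = minimumMoves1_alt s d
instance (s : String) (d : Int) (out : Int) : Decidable (Spec_minimumMoves1 s d out) := by
  unfold Spec_minimumMoves1; infer_instance

-- ===== CLAIM (what is proved, stated in full; the proofs are below) =====
def Claim_equal_minimumMoves1 : Prop := ∀ (s : String) (d : Int), Dom_minimumMoves1 s d → Pre_minimumMoves1 s d → Spec_minimumMoves1 s d (minimumMoves1 s d)

-- ===== LEMMAS AND PROOFS =====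

-- the flush B performs at the end of the string
def minimumMoves1Finish (d : Int) (p : Int × Int) : Int :=
  if 0 ≤ p.2 then p.1 + PySem.Int.floordiv p.2 d else p.1

-- a step on a "free" state (run = -1) with a non-'0' character does nothing
theorem altStep_free (d : Int) (t : Int) (ch : Char) (hch : ch ≠ '0') :
    minimumMoves1AltStep d (t, -1) ch = (t, -1) := by
  unfold minimumMoves1AltStep
  split_ifs with h1 h2 h3 <;> simp_all

-- inside a segment (run ≥ 0), a stretch without '1' just adds its length to run
theorem altFold_no_one (d : Int) (m : List Char) (hm : '1' ∉ m) (t r : Int) (hr : 0 ≤ r) :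
    List.foldl (minimumMoves1AltStep d) (t, r) m = (t, r + (m.length : Int)) := by
  induction m generalizing r with
  | nil => simp
  | cons c cs ih =>
    have hc : c ≠ '1' := fun h => hm (h ▸ List.mem_cons_self)
    have hcs : '1' ∉ cs := fun h => hm (List.mem_cons_of_mem _ h)
    simp only [List.foldl_cons]
    rw [show minimumMoves1AltStep d (t, r) c = (t, r + 1) by
      unfold minimumMoves1AltStep; split_ifs <;> simp_all]
    rw [ih hcs (r + 1) (by omega)]
    simp [List.length_cons]
    ring

-- main invariant: A's loop from index i equals B's fold over the remaining suffix
theorem go_eq_fold (cs : List Char) (d : Int) (i : Nat) (count : Int) :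
    minimumMoves1Go cs d i count
      = minimumMoves1Finish d (List.foldl (minimumMoves1AltStep d) (count, -1) (cs.drop i)) := by
  rw [minimumMoves1Go]
  by_cases h : i < cs.length
  · simp only [dif_pos h]
    by_cases h0 : cs[i] = '0'
    · simp only [dif_pos h0]
      rw [PySem.List.slice_from_natCast]
      split
      next pos hidx =>
        -- the suffix is pre ++ '1' :: suf with pre.length = pos; B's run reaches pos and flushes pos//d at the '1'
        have hpos1 : 1 ≤ pos := minimumMoves1_pos_ge_one cs i h h0 pos hidx
        rw [PySem.List.index?_eq_some_iff] at hidx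
        obtain ⟨pre, suf, hsplit, hlen, hnp⟩ := hidx
        -- A's slice s[i:i+pos] has length pos
        have hslice : (PySem.List.slice cs (some (i : Int)) (some ((i : Int) + (pos : Int)))).length = pos := by
          rw [PySem.List.slice_natCast_add]
          have hlt : pos < (cs.drop i).length := by
            rw [hsplit, List.length_append, List.length_cons, hlen]; omega
          rw [List.length_take, Nat.min_eq_left (by omega)]
        rw [hslice]
        -- recurse on A's loop
        rw [go_eq_fold]
        -- cs.drop (i+pos) = '1' :: suf
        have hdrop : cs.drop (i + pos) = '1' :: suf := by
          have : cs.drop (i + pos) = (cs.drop i).drop pos := by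
            rw [List.drop_drop]
          rw [this, hsplit, List.drop_append_of_le_length (by omega)]
          simp [hlen]
        rw [hdrop]
        -- B side: fold over pre then '1' then suf
        have hpre : pre ≠ [] := by intro hp; rw [hp] at hlen; simp at hlen; omega
        obtain ⟨c0, pre', hpre'⟩ := List.exists_cons_of_ne_nil hpre
        have hc0 : c0 = '0' := by
          have h1 : cs.drop i = c0 :: (pre' ++ '1' :: suf) := by rw [hsplit, hpre']; simp
          have h2 : cs.drop i = cs[i] :: cs.drop (i + 1) := List.drop_eq_getElem_cons h
          have h3 := h2.symm.trans h1
          injection h3 with hh _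
          exact hh ▸ h0
        have hnp' : '1' ∉ pre' := by
          rw [hpre'] at hnp; exact fun hm => hnp (List.mem_cons_of_mem _ hm)
        rw [hsplit, hpre']
        simp only [List.cons_append, List.foldl_cons, List.foldl_append]
        rw [show minimumMoves1AltStep d (count, -1) c0 = (count, 1) by
          unfold minimumMoves1AltStep; split_ifs <;> simp_all]
        rw [altFold_no_one d pre' hnp' count 1 (by omega)]
        have hlen' : (1 : Int) + (pre'.length : Int) = (pos : Int) := by
          rw [hpre'] at hlen; simp [List.length_cons] at hlen; omega
        rw [hlen']
        rw [show minimumMoves1AltStep d (count, (pos : Int)) '1'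
            = (count + PySem.Int.floordiv (pos : Int) d, -1) by
          unfold minimumMoves1AltStep; split_ifs <;> simp_all]
        rw [altStep_free d (count + PySem.Int.floordiv (pos : Int) d) '1' (by decide)]
      next hidx =>
        -- no '1' remains: A adds len(s[i:])//d; B's run grows to the suffix length and is flushed at the end
        rw [PySem.List.index?_eq_none_iff] at hidx
        have hno : '1' ∉ cs.drop i := hidx
        rw [List.drop_eq_getElem_cons h]
        have hno' : '1' ∉ cs.drop (i + 1) := by
          rw [List.drop_eq_getElem_cons h] at hno; exact fun hm => hno (List.mem_cons_of_mem _ hm)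
        simp only [List.foldl_cons]
        rw [show minimumMoves1AltStep d (count, -1) cs[i] = (count, 1) by
          unfold minimumMoves1AltStep; split_ifs <;> simp_all]
        rw [altFold_no_one d _ hno' count 1 (by omega)]
        unfold minimumMoves1Finish
        rw [if_pos (by positivity)]
        simp only [List.length_cons, List.length_drop]
        congr 2
        omega
    · -- a non-'0' character in free state: both sides skip it
      simp only [dif_neg h0]
      rw [go_eq_fold, List.drop_eq_getElem_cons h]
      simp only [List.foldl_cons]
      rw [altStep_free d count cs[i] h0]
  · simp only [dif_neg h]
    rw [List.drop_eq_nil_of_le (by omega)]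
    simp [minimumMoves1Finish]
termination_by cs.length - i
decreasing_by
  all_goals omega

-- ===== VERDICT (by name: the statement is the Claim_ definition above) =====
theorem minimumMoves1_spec : Claim_equal_minimumMoves1 := by
  intro s d _ _
  unfold Spec_minimumMoves1 minimumMoves1 minimumMoves1_alt
  rw [go_eq_fold]
  simp [minimumMoves1Finish]
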